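-- pv_equiv track=rewrite | github.com/yashsingh96/WorkIt | colour_match.py | offspring
-- ===== SOURCE A (Python) =====
-- def offspring(colours):
--     hue_vals = [-10, -5, -2, 15, 45, 65, 165, 180, 265, 300, 340, 360]
--
--     min_hue = 500
--     max_hue = 0
--     min_lum = 100
--     max_lum = 0
--     min_sat = 100
--     max_sat = 0
--
--     for colour in colours:
--         H, S, L = colour
--         min_hue = min(min_hue, H)
--         max_hue = max(max_hue, H)
--         min_lum = min(min_lum, L)
--         max_lum = max(max_lum, L)
--         min_sat = min(min_sat, S)
--         max_sat = max(max_sat, S)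
--
--     return max_hue - min_hue < 100 and max_lum - min_lum < 50 and max_sat - min_sat < 50
-- ===== SOURCE B (Python) =====
-- def offspring(colours):
--     # Two-stage check: find the per-channel minima, then verify every colour
--     # stays within the allowed band above each minimum.
--     if not colours:
--         return True
--     lo_h = min(h for h, _, _ in colours)
--     lo_s = min(s for _, s, _ in colours)
--     lo_l = min(l for _, _, l in colours)
--     return all(h - lo_h < 100 and s - lo_s < 50 and l - lo_l < 50
--                for h, s, l in colours)
-- ===== Notes on version B (the rewrite author's own statement) =====
-- stated objective: alternative
-- what changed: Replaces the single loop threading six running min/max accumulators with a two-stage algorithm: first compute only the per-channel minima, then validate every colour against a fixed band above those minima; no maxima are tracked at all.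
-- intended difference: On nonempty lists whose colours are mutually within the thresholds but contain a channel value outside A's accidental sentinel windows (hue outside (-100,600), sat/lum outside (-50,150)), A returns False because its min/max accumulators start at the sentinels 500/0/100 instead of the data, while B returns True; B's value is intended since the function only tests that the colours are close to each other. — e.g. on offspring([(700, 0, 0)]): A returns false, B returns true
import Mathlib
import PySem

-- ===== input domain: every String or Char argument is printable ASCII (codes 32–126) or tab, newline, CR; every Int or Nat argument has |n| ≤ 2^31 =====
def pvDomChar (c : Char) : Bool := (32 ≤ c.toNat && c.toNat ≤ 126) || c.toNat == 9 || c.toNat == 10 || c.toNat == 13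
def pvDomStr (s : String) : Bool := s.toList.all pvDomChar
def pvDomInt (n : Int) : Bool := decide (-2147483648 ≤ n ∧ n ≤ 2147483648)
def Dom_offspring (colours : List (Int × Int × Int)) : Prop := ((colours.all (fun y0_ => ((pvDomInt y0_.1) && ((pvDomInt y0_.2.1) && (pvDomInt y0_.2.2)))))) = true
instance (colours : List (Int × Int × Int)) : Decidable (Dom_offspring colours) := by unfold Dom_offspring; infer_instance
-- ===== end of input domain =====

-- B checks colour similarity in two stages (per-channel minima, then a band check per
-- colour) instead of A's six-accumulator loop; same O(n) cost, different algorithm.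

-- ===== PORT A =====
-- one loop threading six min/max accumulators, as in A
def offspring (colours : List (Int × Int × Int)) : Bool :=
  let _hue_vals : List Int := [-10, -5, -2, 15, 45, 65, 165, 180, 265, 300, 340, 360]
  let st : Int × Int × Int × Int × Int × Int :=
    colours.foldl
      (fun s c =>
        let H := c.1; let S := c.2.1; let L := c.2.2
        (min s.1 H, max s.2.1 H, min s.2.2.1 L, max s.2.2.2.1 L,
         min s.2.2.2.2.1 S, max s.2.2.2.2.2 S))
      (500, 0, 100, 0, 100, 0)
  decide (st.2.1 - st.1 < 100) && (decide (st.2.2.2.1 - st.2.2.1 < 50) && decide (st.2.2.2.2.2 - st.2.2.2.2.1 < 50))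

-- ===== PORT B =====
-- Python's min over a nonempty iterable: first element, then fold of binary min
def pyMinNE : List Int → Int
  | [] => 0  -- unreachable: Source B only calls min on a nonempty list (guarded by 'if not colours')
  | x :: t => t.foldl min x

def offspring_alt (colours : List (Int × Int × Int)) : Bool :=
  if colours.isEmpty then true
  else
    let loH := pyMinNE (colours.map (fun c => c.1))
    let loS := pyMinNE (colours.map (fun c => c.2.1))
    let loL := pyMinNE (colours.map (fun c => c.2.2))
    colours.all (fun c =>
      decide (c.1 - loH < 100) && (decide (c.2.1 - loS < 50) && decide (c.2.2 - loL < 50)))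

-- ===== PRECONDITION & SPEC =====
-- On nonempty lists whose colours are mutually within the thresholds but with some channel
-- value outside A's sentinel windows (hue outside (-100,600), sat/lum outside (-50,150)),
-- A returns False only because its accumulators start at 500/0/100; B returns True, the
-- intended value, since the function only tests that the colours are close to each other.
-- (Second conjunct: some colour is not close to A's virtual sentinel colours,
-- i.e. one of its channel values lies outside the corresponding sentinel window.)
abbrev pvClose (a b : Int × Int × Int) : Prop :=
  a.1 - b.1 < 100 ∧ a.2.1 - b.2.1 < 50 ∧ a.2.2 - b.2.2 < 50

def D_offspring (colours : List (Int × Int × Int)) : Prop :=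
  (∀ a ∈ colours, ∀ b ∈ colours, pvClose a b) ∧
  ¬ ∀ a ∈ colours, pvClose (0, 0, 0) a ∧ pvClose a (500, 100, 100)

instance (colours : List (Int × Int × Int)) : Decidable (D_offspring colours) := by
  unfold D_offspring; infer_instance

def Spec_offspring (colours : List (Int × Int × Int)) (out : Bool) : Prop :=
  ¬ D_offspring colours → out = offspring_alt colours
instance (colours : List (Int × Int × Int)) (out : Bool) : Decidable (Spec_offspring colours out) := by
  unfold Spec_offspring; infer_instance

def pvDiffWitness_offspring : (List (Int × Int × Int)) := [(700, 0, 0)]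
def pvDiffWitnessOut_offspring : Bool × Bool := (false, true)

-- ===== CLAIM (what is proved, stated in full; the proofs are below) =====
def Claim_unchanged_offspring : Prop :=
  ∀ (colours : List (Int × Int × Int)), Dom_offspring colours → Spec_offspring colours (offspring colours)
def Claim_changed_offspring : Prop :=
  Dom_offspring (pvDiffWitness_offspring) ∧ D_offspring (pvDiffWitness_offspring) ∧
  offspring (pvDiffWitness_offspring) = pvDiffWitnessOut_offspring.1 ∧
  offspring_alt (pvDiffWitness_offspring) = pvDiffWitnessOut_offspring.2 ∧
  pvDiffWitnessOut_offspring.1 ≠ pvDiffWitnessOut_offspring.2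
def Claim_exact_offspring : Prop :=
  ∀ (colours : List (Int × Int × Int)), Dom_offspring colours → D_offspring colours →
    offspring colours ≠ offspring_alt colours

-- ===== LEMMAS AND PROOFS =====

theorem le_foldl_max (xs : List Int) (s : Int) : s ≤ xs.foldl max s := by
  induction xs generalizing s with
  | nil => simp
  | cons x t ih => exact le_trans (le_max_left s x) (ih (max s x))

theorem mem_le_foldl_max (xs : List Int) (s x : Int) (hx : x ∈ xs) : x ≤ xs.foldl max s := by
  induction xs generalizing s with
  | nil => cases hx
  | cons a t ih =>
    rcases List.mem_cons.mp hx with h | h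
    · subst h; exact le_trans (le_max_right s x) (le_foldl_max t (max s x))
    · exact ih _ h

theorem foldl_max_cases (xs : List Int) (s : Int) :
    xs.foldl max s = s ∨ xs.foldl max s ∈ xs := by
  induction xs generalizing s with
  | nil => exact Or.inl rfl
  | cons a t ih =>
    rcases ih (max s a) with h | h
    · rcases max_choice s a with hm | hm
      · exact Or.inl (by rw [List.foldl_cons, h, hm])
      · exact Or.inr (by rw [List.foldl_cons, h, hm]; exact List.mem_cons_self ..)
    · exact Or.inr (List.mem_cons_of_mem _ h)

theorem foldl_min_le (xs : List Int) (s : Int) : xs.foldl min s ≤ s := by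
  induction xs generalizing s with
  | nil => simp
  | cons x t ih => exact le_trans (ih (min s x)) (min_le_left s x)

theorem foldl_min_le_mem (xs : List Int) (s x : Int) (hx : x ∈ xs) : xs.foldl min s ≤ x := by
  induction xs generalizing s with
  | nil => cases hx
  | cons a t ih =>
    rcases List.mem_cons.mp hx with h | h
    · subst h; exact le_trans (foldl_min_le t (min s x)) (min_le_right s x)
    · exact ih _ h

theorem foldl_min_cases (xs : List Int) (s : Int) :
    xs.foldl min s = s ∨ xs.foldl min s ∈ xs := by
  induction xs generalizing s with
  | nil => exact Or.inl rfl
  | cons a t ih =>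
    rcases ih (min s a) with h | h
    · rcases min_choice s a with hm | hm
      · exact Or.inl (by rw [List.foldl_cons, h, hm])
      · exact Or.inr (by rw [List.foldl_cons, h, hm]; exact List.mem_cons_self ..)
    · exact Or.inr (List.mem_cons_of_mem _ h)

-- A's six-accumulator fold computes exactly the per-channel folds
theorem fold_split (colours : List (Int × Int × Int))
    (mh Mh ml Ml ms Ms : Int) :
    colours.foldl
      (fun (s : Int × Int × Int × Int × Int × Int) c =>
        let H := c.1; let S := c.2.1; let L := c.2.2
        (min s.1 H, max s.2.1 H, min s.2.2.1 L, max s.2.2.2.1 L,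
         min s.2.2.2.2.1 S, max s.2.2.2.2.2 S))
      (mh, Mh, ml, Ml, ms, Ms)
    = ((colours.map (fun c => c.1)).foldl min mh,
       (colours.map (fun c => c.1)).foldl max Mh,
       (colours.map (fun c => c.2.2)).foldl min ml,
       (colours.map (fun c => c.2.2)).foldl max Ml,
       (colours.map (fun c => c.2.1)).foldl min ms,
       (colours.map (fun c => c.2.1)).foldl max Ms) := by
  induction colours generalizing mh Mh ml Ml ms Ms with
  | nil => simp
  | cons c t ih => simp [List.foldl_cons, ih]

-- the sentinel-seeded range test, characterised: spread bounded pairwise + window per element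
theorem range_iff (xs : List Int) (sMax sMin th : Int) (h0 : sMax - sMin < th) :
    (xs.foldl max sMax - xs.foldl min sMin < th) ↔
    ((∀ a ∈ xs, ∀ b ∈ xs, a - b < th) ∧ (∀ a ∈ xs, a - sMin < th ∧ sMax - a < th)) := by
  constructor
  · intro h
    refine ⟨fun a ha b hb => ?_, fun a ha => ⟨?_, ?_⟩⟩
    · have h1 := mem_le_foldl_max xs sMax a ha
      have h2 := foldl_min_le_mem xs sMin b hb
      omega
    · have h1 := mem_le_foldl_max xs sMax a ha
      have h2 := foldl_min_le xs sMin
      omega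
    · have h1 := le_foldl_max xs sMax
      have h2 := foldl_min_le_mem xs sMin a ha
      omega
  · rintro ⟨hq, hw⟩
    rcases foldl_max_cases xs sMax with hM | hM <;> rcases foldl_min_cases xs sMin with hm | hm
    · omega
    · have := (hw _ hm).2; omega
    · have := (hw _ hM).1; omega
    · have := hq _ hM _ hm; omega

theorem chan_iff (cs : List (Int × Int × Int)) (f : Int × Int × Int → Int)
    (sMax sMin th : Int) (h0 : sMax - sMin < th) :
    ((cs.map f).foldl max sMax - (cs.map f).foldl min sMin < th) ↔
    ((∀ a ∈ cs, ∀ b ∈ cs, f a - f b < th) ∧ (∀ a ∈ cs, f a - sMin < th ∧ sMax - f a < th)) := by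
  rw [range_iff _ _ _ _ h0]
  simp only [List.forall_mem_map]

theorem offspring_iff (cs : List (Int × Int × Int)) :
    offspring cs = true ↔
      (((∀ a ∈ cs, ∀ b ∈ cs, (a : Int × Int × Int).1 - b.1 < 100) ∧
          (∀ a ∈ cs, (a : Int × Int × Int).1 - 500 < 100 ∧ 0 - a.1 < 100)) ∧
       ((∀ a ∈ cs, ∀ b ∈ cs, (a : Int × Int × Int).2.2 - b.2.2 < 50) ∧
          (∀ a ∈ cs, (a : Int × Int × Int).2.2 - 100 < 50 ∧ 0 - a.2.2 < 50)) ∧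
       ((∀ a ∈ cs, ∀ b ∈ cs, (a : Int × Int × Int).2.1 - b.2.1 < 50) ∧
          (∀ a ∈ cs, (a : Int × Int × Int).2.1 - 100 < 50 ∧ 0 - a.2.1 < 50))) := by
  unfold offspring
  simp only [fold_split, Bool.and_eq_true, decide_eq_true_eq]
  exact and_congr (chan_iff cs (fun c => c.1) 0 500 100 (by norm_num))
    (and_congr (chan_iff cs (fun c => c.2.2) 0 100 50 (by norm_num))
      (chan_iff cs (fun c => c.2.1) 0 100 50 (by norm_num)))

-- the anchored band test equals the pairwise test (nonempty list y :: ys)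
theorem anchor_iff (y : Int) (ys : List Int) (th : Int) :
    (∀ a ∈ y :: ys, a - ys.foldl min y < th) ↔
    (∀ a ∈ y :: ys, ∀ b ∈ y :: ys, a - b < th) := by
  constructor
  · intro h a ha b hb
    have hlo : ys.foldl min y ≤ b := by
      rcases List.mem_cons.mp hb with hb' | hb'
      · rw [hb']; exact foldl_min_le ys y
      · exact foldl_min_le_mem ys y b hb'
    have := h a ha
    omega
  · intro h a ha
    rcases foldl_min_cases ys y with hm | hm
    · rw [hm]; exact h a ha y (by simp)
    · exact h a ha _ (List.mem_cons_of_mem _ hm)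

theorem chanB_iff (x : Int × Int × Int) (xs : List (Int × Int × Int))
    (f : Int × Int × Int → Int) (th : Int) :
    (∀ a ∈ x :: xs, f a - (xs.map f).foldl min (f x) < th) ↔
    (∀ a ∈ x :: xs, ∀ b ∈ x :: xs, f a - f b < th) := by
  have h := anchor_iff (f x) (xs.map f) th
  rw [show f x :: xs.map f = (x :: xs).map f from rfl] at h
  simp only [List.forall_mem_map] at h
  exact h

theorem alt_iff (x : Int × Int × Int) (xs : List (Int × Int × Int)) :
    offspring_alt (x :: xs) = true ↔
      ((∀ a ∈ x :: xs, ∀ b ∈ x :: xs, (a : Int × Int × Int).1 - b.1 < 100) ∧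
       (∀ a ∈ x :: xs, ∀ b ∈ x :: xs, (a : Int × Int × Int).2.1 - b.2.1 < 50) ∧
       (∀ a ∈ x :: xs, ∀ b ∈ x :: xs, (a : Int × Int × Int).2.2 - b.2.2 < 50)) := by
  have e1 := chanB_iff x xs (fun c => c.1) 100
  have e2 := chanB_iff x xs (fun c => c.2.1) 50
  have e3 := chanB_iff x xs (fun c => c.2.2) 50
  simp only [offspring_alt, pyMinNE, List.isEmpty_cons, List.map_cons, Bool.false_eq_true,
    if_false, List.all_eq_true, Bool.and_eq_true, decide_eq_true_eq]
  constructor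
  · intro h
    exact ⟨e1.mp (fun a ha => (h a ha).1), e2.mp (fun a ha => (h a ha).2.1),
           e3.mp (fun a ha => (h a ha).2.2)⟩
  · rintro ⟨q1, q2, q3⟩ a ha
    exact ⟨e1.mpr q1 a ha, e2.mpr q2 a ha, e3.mpr q3 a ha⟩

-- ===== VERDICT (by name: the statements are the Claim_ definitions above) =====
theorem offspring_spec : Claim_unchanged_offspring := by
  intro cs _ hnd
  show offspring cs = offspring_alt cs
  cases cs with
  | nil => decide
  | cons x xs =>
    rw [Bool.eq_iff_iff, offspring_iff, alt_iff]
    constructor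
    · rintro ⟨⟨q1, _⟩, ⟨q3, _⟩, ⟨q2, _⟩⟩
      exact ⟨q1, q2, q3⟩
    · rintro ⟨q1, q2, q3⟩
      have hw : ∀ a ∈ x :: xs, pvClose (0, 0, 0) a ∧ pvClose a (500, 100, 100) := by
        by_contra hcon
        exact hnd ⟨fun p hp q hq => ⟨q1 p hp q hq, q2 p hp q hq, q3 p hp q hq⟩, hcon⟩
      exact ⟨⟨q1, fun a ha => ⟨(hw a ha).2.1, (hw a ha).1.1⟩⟩,
             ⟨q3, fun a ha => ⟨(hw a ha).2.2.2, (hw a ha).1.2.2⟩⟩,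
             ⟨q2, fun a ha => ⟨(hw a ha).2.2.1, (hw a ha).1.2.1⟩⟩⟩

theorem offspring_changed : Claim_changed_offspring := by
  unfold Claim_changed_offspring; decide

theorem offspring_tight : Claim_exact_offspring := by
  intro cs _ hd heq
  obtain ⟨hQ, hnW⟩ := hd
  cases cs with
  | nil => exact hnW (by simp)
  | cons x xs =>
    have hb : offspring_alt (x :: xs) = true :=
      (alt_iff x xs).mpr ⟨fun p hp q hq' => (hQ p hp q hq').1,
        fun p hp q hq' => (hQ p hp q hq').2.1, fun p hp q hq' => (hQ p hp q hq').2.2⟩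
    rw [hb] at heq
    obtain ⟨⟨_, w1⟩, ⟨_, w3⟩, ⟨_, w2⟩⟩ := (offspring_iff (x :: xs)).mp heq
    exact hnW fun a ha => ⟨⟨(w1 a ha).2, (w2 a ha).2, (w3 a ha).2⟩,
                           ⟨(w1 a ha).1, (w2 a ha).1, (w3 a ha).1⟩⟩
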